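-- pv_equiv track=rewrite | github.com/depinfonancy/IntroTestDir | src/scrabble.py | ecrivable
-- ===== SOURCE A (Python) =====
-- def ecrivable(mot, tirage) :
--     """ test si le mot peut etre ecrit avec les caracteres du tirage """
--     t_tmp  = list(tirage)   #  copie du tirage (ne pas détruire tirage en paramètre)
--     for c in mot:
--         if c in t_tmp:
--             t_tmp.remove(c)
--         else :
--             return False
--     return True
-- ===== SOURCE B (Python) =====
-- def ecrivable(mot, tirage):
--     """ test si le mot peut etre ecrit avec les caracteres du tirage """
--     m = sorted(mot)
--     t = sorted(tirage)
--     i = 0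
--     for c in m:
--         while i < len(t) and t[i] != c:
--             i += 1
--         if i == len(t):
--             return False
--         i += 1
--     return True
-- ===== Notes on version B (the rewrite author's own statement) =====
-- stated objective: faster
-- what changed: Sorts both strings once and replaces A's per-character membership scan + list.remove over a mutable copy with a single monotone two-pointer merge over the two sorted sequences (a greedy subsequence test).
import Mathlib
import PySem

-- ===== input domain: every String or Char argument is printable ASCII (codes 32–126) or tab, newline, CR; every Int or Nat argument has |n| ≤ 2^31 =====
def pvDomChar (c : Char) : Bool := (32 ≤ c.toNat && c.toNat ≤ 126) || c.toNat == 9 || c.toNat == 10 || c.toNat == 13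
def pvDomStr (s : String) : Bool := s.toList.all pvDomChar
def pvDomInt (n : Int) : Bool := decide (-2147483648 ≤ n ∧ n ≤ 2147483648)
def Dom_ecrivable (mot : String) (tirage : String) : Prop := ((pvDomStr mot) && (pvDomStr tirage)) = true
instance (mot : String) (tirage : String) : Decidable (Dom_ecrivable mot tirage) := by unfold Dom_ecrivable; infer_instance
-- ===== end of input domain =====

-- B sorts both strings once and tests buildability with a single monotone two-pointer
-- merge over the sorted sequences, instead of A's per-character scan+remove (objective: faster).


-- ===== PORT A =====
-- A's loop: for c in mot: if c in t_tmp: t_tmp.remove(c) (remove first occurrence) else return False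
def ecrivableLoop : List Char → List Char → Bool
  | [], _ => true
  | c :: cs, t => if c ∈ t then ecrivableLoop cs (t.erase c) else false

def ecrivable (mot : String) (tirage : String) : Bool :=
  ecrivableLoop mot.toList tirage.toList

-- ===== PORT B =====
-- B's pointer loop over the sorted tirage: for each c of sorted mot, advance i over
-- sorted tirage past letters ≠ c; fail if the pointer falls off the end, else consume t[i].
def ecrivableMerge : List Char → List Char → Bool
  | [], _ => true
  | _ :: _, [] => false
  | c :: cs, x :: xs => if x = c then ecrivableMerge cs xs else ecrivableMerge (c :: cs) xs

def ecrivable_alt (mot : String) (tirage : String) : Bool :=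
  ecrivableMerge (PySem.List.sorted mot.toList (fun c => c) false)
                 (PySem.List.sorted tirage.toList (fun c => c) false)

-- ===== PRECONDITION & SPEC =====
def Spec_ecrivable (mot : String) (tirage : String) (out : Bool) : Prop := out = ecrivable_alt mot tirage
instance (mot : String) (tirage : String) (out : Bool) : Decidable (Spec_ecrivable mot tirage out) := by unfold Spec_ecrivable; infer_instance

-- ===== CLAIM (what is proved, stated in full; the proofs are below) =====
def Claim_equal_ecrivable : Prop := ∀ (mot : String) (tirage : String), Dom_ecrivable mot tirage → Spec_ecrivable mot tirage (ecrivable mot tirage)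

-- ===== LEMMAS AND PROOFS =====

-- A's loop succeeds exactly when mot is a sub-multiset of tirage
theorem ecrivableLoop_iff_count (ms t : List Char) :
    ecrivableLoop ms t = true ↔ ∀ c, ms.count c ≤ t.count c := by
  induction ms generalizing t with
  | nil => simp [ecrivableLoop]
  | cons c cs ih =>
      simp only [ecrivableLoop]
      by_cases hmem : c ∈ t
      · rw [if_pos hmem, ih]
        constructor
        · intro h x
          by_cases hxc : x = c
          · subst hxc
            have he := List.count_erase_self (a := x) (l := t)
            have h1 : 1 ≤ t.count x := List.one_le_count_iff.mpr hmem
            have hx := h x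
            simp only [List.count_cons_self]
            omega
          · have hx := h x
            rw [List.count_erase_of_ne hxc] at hx
            rw [List.count_cons_of_ne (Ne.symm hxc)]
            exact hx
        · intro h x
          by_cases hxc : x = c
          · subst hxc
            have he := List.count_erase_self (a := x) (l := t)
            have h1 : 1 ≤ t.count x := List.one_le_count_iff.mpr hmem
            have hx := h x
            simp only [List.count_cons_self] at hx
            omega
          · have hx := h x
            rw [List.count_cons_of_ne (Ne.symm hxc)] at hx
            rw [List.count_erase_of_ne hxc]
            exact hx
      · rw [if_neg hmem]
        have hz : t.count c = 0 := List.count_eq_zero.mpr hmem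
        simp only [Bool.false_eq_true, false_iff, not_forall, not_le]
        exact ⟨c, by simp [hz, List.count_cons_self]⟩

-- the greedy pointer merge decides the subsequence relation
theorem ecrivableMerge_iff_sublist (ms t : List Char) :
    ecrivableMerge ms t = true ↔ List.Sublist ms t := by
  induction t generalizing ms with
  | nil =>
      cases ms with
      | nil => simp [ecrivableMerge]
      | cons c cs => simp [ecrivableMerge]
  | cons x xs ih =>
      cases ms with
      | nil => simp [ecrivableMerge]
      | cons c cs =>
          simp only [ecrivableMerge]
          by_cases hxc : x = c
          · subst hxc
            rw [if_pos rfl, ih]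
            exact (List.cons_sublist_cons).symm
          · rw [if_neg hxc, ih]
            constructor
            · exact fun h => h.cons x
            · intro h
              cases h with
              | cons _ h' => exact h'
              | cons₂ _ h' => exact absurd rfl hxc

-- ===== VERDICT (by name: the statement is the Claim_ definition above) =====
theorem ecrivable_spec : Claim_equal_ecrivable := by
  intro mot tirage _
  unfold Spec_ecrivable ecrivable ecrivable_alt
  rw [Bool.eq_iff_iff, ecrivableLoop_iff_count, ecrivableMerge_iff_sublist]
  constructor
  · intro h
    apply List.sublist_of_subperm_of_pairwise (r := fun a b : Char => a ≤ b)
    · rw [List.subperm_iff_count]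
      intro a
      rw [(PySem.List.sorted_perm _ _ _).count_eq, (PySem.List.sorted_perm _ _ _).count_eq]
      exact h a
    · simpa using PySem.List.sorted_pairwise mot.toList (fun c => c)
    · simpa using PySem.List.sorted_pairwise tirage.toList (fun c => c)
  · intro h c
    have := List.subperm_iff_count.mp h.subperm c
    rwa [(PySem.List.sorted_perm _ _ _).count_eq, (PySem.List.sorted_perm _ _ _).count_eq] at this
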